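-- pv_equiv track=rewrite | github.com/pokerdio/generic | e/e-389.py | gen_outcomes
-- ===== SOURCE A (Python) =====
-- def gen_outcomes(ndice, nside):
--     v = [1]
--
--     for _ in range(ndice):
--         v2 = [0] * (len(v) + nside)
--         for dice_roll in range(1, nside + 1):
--             for i in range(len(v)):
--                 v2[i + dice_roll] += v[i]
--
--         v = v2
--     return v
-- ===== SOURCE B (Python) =====
-- def gen_outcomes(ndice, nside):
--     v = [1]
--     for _ in range(ndice):
--         n = len(v) + nside
--         pre = [0]
--         s = 0
--         for x in v:
--             s += x
--             pre.append(s)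
--         v = [pre[min(j, len(v))] - pre[max(j - nside, 0)] for j in range(n)]
--     return v
-- ===== Notes on version B (the rewrite author's own statement) =====
-- stated objective: faster
-- what changed: Per die, A adds the vector shifted by every roll value in nested loops; B builds one prefix-sum array and emits each new cell as a single windowed difference of two prefix sums, removing the per-roll inner loop.
import Mathlib
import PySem

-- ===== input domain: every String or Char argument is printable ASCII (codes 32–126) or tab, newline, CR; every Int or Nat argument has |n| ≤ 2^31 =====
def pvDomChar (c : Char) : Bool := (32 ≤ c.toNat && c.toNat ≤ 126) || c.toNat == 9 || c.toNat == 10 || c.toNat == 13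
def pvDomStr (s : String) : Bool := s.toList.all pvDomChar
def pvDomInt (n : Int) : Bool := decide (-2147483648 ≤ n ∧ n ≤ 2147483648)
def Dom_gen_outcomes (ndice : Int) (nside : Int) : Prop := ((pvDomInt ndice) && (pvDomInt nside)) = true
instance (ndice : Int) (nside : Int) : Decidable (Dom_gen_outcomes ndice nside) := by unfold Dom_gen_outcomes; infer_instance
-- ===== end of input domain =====

-- B replaces A's per-roll inner accumulation loop (O(ndice^2*nside^2)) by one prefix-sum
-- sliding-window convolution per die (O(ndice^2*nside)); same return value everywhere.

-- ===== PORT A =====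
def gen_outcomes (ndice : Int) (nside : Int) : List Int :=
  (PySem.List.pyRange 0 ndice 1).foldl
    (fun v _ =>
      (PySem.List.pyRange 1 (nside + 1) 1).foldl
        (fun v2 r =>
          (PySem.List.pyRange 0 (v.length : Int) 1).foldl
            (fun w i =>
              PySem.List.pySetD w (i + r)
                (PySem.List.pyGetD w (i + r) 0 + PySem.List.pyGetD v i 0))
            v2)
        (List.replicate ((v.length : Int) + nside).toNat 0))
    [1]

-- ===== PORT B =====
def gen_outcomes_alt (ndice : Int) (nside : Int) : List Int :=
  (PySem.List.pyRange 0 ndice 1).foldl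
    (fun v _ =>
      let n : Int := (v.length : Int) + nside
      let ps := v.foldl (fun (acc : List Int × Int) x => (acc.1 ++ [acc.2 + x], acc.2 + x)) ([0], 0)
      (PySem.List.pyRange 0 n 1).map
        (fun j => PySem.List.pyGetD ps.1 (min j (v.length : Int)) 0
                - PySem.List.pyGetD ps.1 (max (j - nside) 0) 0))
    [1]

-- ===== PRECONDITION & SPEC =====
def Spec_gen_outcomes (ndice : Int) (nside : Int) (out : List Int) : Prop := out = gen_outcomes_alt ndice nside
instance (ndice : Int) (nside : Int) (out : List Int) : Decidable (Spec_gen_outcomes ndice nside out) := by unfold Spec_gen_outcomes; infer_instance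

-- ===== CLAIM (what is proved, stated in full; the proofs are below) =====
def Claim_equal_gen_outcomes : Prop := ∀ (ndice : Int) (nside : Int), Dom_gen_outcomes ndice nside → Spec_gen_outcomes ndice nside (gen_outcomes ndice nside)

-- ===== LEMMAS AND PROOFS =====

-- the per-die step of A (one box convolution done by nested index loops)
def stepA (nside : Int) (v : List Int) : List Int :=
  (PySem.List.pyRange 1 (nside + 1) 1).foldl
    (fun v2 r =>
      (PySem.List.pyRange 0 (v.length : Int) 1).foldl
        (fun w i =>
          PySem.List.pySetD w (i + r)
            (PySem.List.pyGetD w (i + r) 0 + PySem.List.pyGetD v i 0))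
        v2)
    (List.replicate ((v.length : Int) + nside).toNat 0)

-- the per-die step of B (prefix sums, then a windowed difference)
def stepB (nside : Int) (v : List Int) : List Int :=
  let n : Int := (v.length : Int) + nside
  let ps := v.foldl (fun (acc : List Int × Int) x => (acc.1 ++ [acc.2 + x], acc.2 + x)) ([0], 0)
  (PySem.List.pyRange 0 n 1).map
    (fun j => PySem.List.pyGetD ps.1 (min j (v.length : Int)) 0
            - PySem.List.pyGetD ps.1 (max (j - nside) 0) 0)

lemma genA_eq (ndice nside : Int) :
    gen_outcomes ndice nside = (PySem.List.pyRange 0 ndice 1).foldl (fun v _ => stepA nside v) [1] := rfl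

lemma genB_eq (ndice nside : Int) :
    gen_outcomes_alt ndice nside = (PySem.List.pyRange 0 ndice 1).foldl (fun v _ => stepB nside v) [1] := rfl

-- Nat-indexed form of A's inner loop
def innA (v : List Int) (r : Nat) (w : List Int) : List Int :=
  (List.range v.length).foldl (fun w i => w.set (i + r) (w.getD (i + r) 0 + v.getD i 0)) w

-- value added into cell j by all rolls 1..k
def S (v : List Int) (k : Nat) (j : Nat) : Int :=
  ((List.range k).map (fun t => if t + 1 ≤ j ∧ j - (t + 1) < v.length then v.getD (j - (t + 1)) 0 else 0)).sum

lemma getD_set (l : List Int) (n j : Nat) (a : Int) (hn : n < l.length) :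
    (l.set n a).getD j 0 = if j = n then a else l.getD j 0 := by
  simp only [List.getD_eq_getElem?_getD, List.getElem?_set]
  by_cases h : j = n
  · subst h; simp [hn]
  · rw [if_neg (by omega), if_neg h]

lemma take_succ_sum (v : List Int) (n : Nat) :
    (v.take (n + 1)).sum = (v.take n).sum + v.getD n 0 := by
  rw [List.take_add_one, List.sum_append]
  rcases h : v[n]? with _ | x
  · simp [List.getD_eq_getElem?_getD, h]
  · simp [List.getD_eq_getElem?_getD, h]

lemma innA_eq_pyfold (v w : List Int) (r : Nat) :
    (PySem.List.pyRange 0 (v.length : Int) 1).foldl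
      (fun w i => PySem.List.pySetD w (i + (r : Int))
        (PySem.List.pyGetD w (i + (r : Int)) 0 + PySem.List.pyGetD v i 0)) w
    = innA v r w := by
  rw [PySem.List.pyRange_zero_nat, List.foldl_map, innA]
  congr 1
  funext w k
  rw [show ((k : Int) + (r : Int)) = ((k + r : Nat) : Int) by push_cast; ring,
    PySem.List.pySetD_natCast, PySem.List.pyGetD_natCast, PySem.List.pyGetD_natCast]

lemma innAux_spec (v : List Int) (r : Nat) (m : Nat) (w : List Int) (hm : m + r ≤ w.length) :
    ((List.range m).foldl (fun w i => w.set (i + r) (w.getD (i + r) 0 + v.getD i 0)) w).length = w.length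
    ∧ ∀ j : Nat, ((List.range m).foldl (fun w i => w.set (i + r) (w.getD (i + r) 0 + v.getD i 0)) w).getD j 0
        = w.getD j 0 + (if r ≤ j ∧ j - r < m then v.getD (j - r) 0 else 0) := by
  induction m with
  | zero =>
    refine ⟨rfl, fun j => ?_⟩
    simp
  | succ m ih =>
    obtain ⟨hlen, hget⟩ := ih (by omega)
    rw [List.range_succ, List.foldl_append, List.foldl_cons, List.foldl_nil]
    have hmr : m + r < ((List.range m).foldl (fun w i => w.set (i + r) (w.getD (i + r) 0 + v.getD i 0)) w).length := by
      rw [hlen]; omega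
    constructor
    · rw [List.length_set, hlen]
    · intro j
      rw [getD_set _ _ _ _ hmr]
      by_cases hj : j = m + r
      · subst hj
        rw [if_pos rfl, hget]
        have h1 : ¬ (r ≤ m + r ∧ m + r - r < m) := by omega
        have h2 : (r ≤ m + r ∧ m + r - r < m + 1) := by omega
        rw [if_neg h1, if_pos h2]
        simp
      · rw [if_neg hj, hget]
        have h3 : (r ≤ j ∧ j - r < m + 1) ↔ (r ≤ j ∧ j - r < m) := by omega
        exact (if_congr h3 rfl rfl).symm ▸ rfl

lemma innA_spec (v : List Int) (r : Nat) (w : List Int) (hw : v.length + r ≤ w.length) :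
    (innA v r w).length = w.length
    ∧ ∀ j : Nat, (innA v r w).getD j 0
        = w.getD j 0 + (if r ≤ j ∧ j - r < v.length then v.getD (j - r) 0 else 0) :=
  innAux_spec v r v.length w hw

lemma rollAux_spec (v : List Int) (k : Nat) (w : List Int) (hw : v.length + k ≤ w.length) :
    ((List.range k).foldl (fun w t => innA v (t + 1) w) w).length = w.length
    ∧ ∀ j : Nat, ((List.range k).foldl (fun w t => innA v (t + 1) w) w).getD j 0
        = w.getD j 0 + S v k j := by
  induction k with
  | zero => exact ⟨rfl, fun j => by simp [S]⟩
  | succ k ih =>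
    obtain ⟨hlen, hget⟩ := ih (by omega)
    rw [List.range_succ, List.foldl_append, List.foldl_cons, List.foldl_nil]
    obtain ⟨hlen2, hget2⟩ := innA_spec v (k + 1) _ (by rw [hlen]; omega)
    refine ⟨by rw [hlen2, hlen], fun j => ?_⟩
    rw [hget2, hget]
    have hS : S v (k + 1) j = S v k j + (if k + 1 ≤ j ∧ j - (k + 1) < v.length then v.getD (j - (k + 1)) 0 else 0) := by
      simp [S, List.range_succ]
    rw [hS]; ring

lemma S_closed (v : List Int) (s : Nat) (j : Nat) :
    S v s j = (v.take (min j v.length)).sum - (v.take (j - s)).sum := by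
  induction s with
  | zero =>
    simp only [S, List.range_zero, List.map_nil, List.sum_nil, Nat.sub_zero]
    by_cases hj : j ≤ v.length
    · rw [min_eq_left hj]; ring
    · rw [min_eq_right (by omega), List.take_of_length_le (by omega),
        List.take_of_length_le (by omega)]; ring
  | succ s ih =>
    have hS : S v (s + 1) j = S v s j + (if s + 1 ≤ j ∧ j - (s + 1) < v.length then v.getD (j - (s + 1)) 0 else 0) := by
      simp [S, List.range_succ]
    rw [hS, ih]
    by_cases h1 : s + 1 ≤ j
    · rw [show j - s = (j - (s + 1)) + 1 by omega, take_succ_sum]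
      by_cases h2 : j - (s + 1) < v.length
      · rw [if_pos ⟨h1, h2⟩]; ring
      · rw [if_neg (by tauto), List.getD_eq_default _ _ (by omega)]; ring
    · rw [if_neg (by tauto), show j - s = j - (s + 1) by omega]; ring

lemma preAux (v : List Int) (p : List Int) (s0 : Int) :
    v.foldl (fun (acc : List Int × Int) x => (acc.1 ++ [acc.2 + x], acc.2 + x)) (p, s0)
    = (p ++ (List.range v.length).map (fun k => s0 + (v.take (k + 1)).sum), s0 + v.sum) := by
  induction v generalizing p s0 with
  | nil => simp
  | cons x xs ih =>
    rw [List.foldl_cons, ih]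
    refine Prod.ext ?_ (by simp; ring)
    simp only [List.length_cons, List.range_succ_eq_map, List.map_cons, List.map_map]
    simp [Function.comp_def, List.take_succ_cons, add_assoc]

lemma pre_char (v : List Int) :
    (v.foldl (fun (acc : List Int × Int) x => (acc.1 ++ [acc.2 + x], acc.2 + x)) ([0], 0)).1
    = (List.range (v.length + 1)).map (fun k => (v.take k).sum) := by
  rw [preAux]
  simp [List.range_succ_eq_map, Function.comp_def]

lemma stepB_char (s : Nat) (v : List Int) :
    stepB (s : Int) v
    = (List.range (v.length + s)).map (fun j => (v.take (min j v.length)).sum - (v.take (j - s)).sum) := by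
  dsimp only [stepB]
  rw [show ((v.length : Int) + (s : Int)) = ((v.length + s : Nat) : Int) by push_cast; ring]
  rw [PySem.List.pyRange_zero_nat, List.map_map]
  apply List.map_congr_left
  intro j hj
  rw [List.mem_range] at hj
  simp only [Function.comp_apply]
  rw [pre_char]
  rw [show min ((j:Int)) ((v.length:Int)) = ((min j v.length : Nat) : Int) by omega,
      show max ((j:Int) - (s:Int)) 0 = ((j - s : Nat) : Int) by omega,
      PySem.List.pyGetD_natCast, PySem.List.pyGetD_natCast,
      PySem.List.getD_map_range _ _ _ _ (by omega),
      PySem.List.getD_map_range _ _ _ _ (by omega)]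

lemma stepA_char (s : Nat) (v : List Int) :
    (stepA (s : Int) v).length = v.length + s
    ∧ ∀ j : Nat, (stepA (s : Int) v).getD j 0 = S v s j := by
  have h1 : stepA (s : Int) v
      = (List.range s).foldl (fun w t => innA v (t + 1) w) (List.replicate (v.length + s) 0) := by
    dsimp only [stepA]
    rw [show ((v.length : Int) + (s : Int)).toNat = v.length + s by omega]
    rw [show PySem.List.pyRange 1 ((s : Int) + 1) 1 = List.map (fun k : Nat => (1 : Int) + (k : Int)) (List.range s) from by
      rw [PySem.List.pyRange_one, show ((s : Int) + 1 - 1).toNat = s by omega], List.foldl_map]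
    congr 1
    funext w t
    rw [show ((1 : Int) + (t : Int)) = (((t + 1 : Nat)) : Int) by push_cast; ring]
    exact innA_eq_pyfold v w (t + 1)
  obtain ⟨hlen, hget⟩ := rollAux_spec v s (List.replicate (v.length + s) 0) (by simp)
  rw [h1, hlen]
  refine ⟨by simp, fun j => ?_⟩
  rw [hget]
  by_cases hj : j < v.length + s
  · rw [List.getD_replicate _ hj]; ring
  · rw [List.getD_eq_default _ _ (by simp; omega)]; ring

lemma step_eq (s : Nat) (v : List Int) : stepA (s : Int) v = stepB (s : Int) v := by
  obtain ⟨hlen, hget⟩ := stepA_char s v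
  rw [stepB_char]
  apply List.ext_getElem
  · rw [hlen]; simp
  · intro i h1 h2
    rw [show (stepA (s : Int) v)[i] = (stepA (s : Int) v).getD i 0 from (List.getD_eq_getElem _ _ h1).symm,
      hget, S_closed, List.getElem_map, List.getElem_range]

lemma stepA_nil_neg (nside : Int) (h : nside < 0) : stepA nside [] = [] := by
  simp [stepA, PySem.List.pyRange_one_eq_nil (show nside + 1 ≤ 1 by omega)]; omega

lemma stepA_one_neg (nside : Int) (h : nside < 0) : stepA nside [1] = [] := by
  simp [stepA, PySem.List.pyRange_one_eq_nil (show nside + 1 ≤ 1 by omega),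
    Int.toNat_of_nonpos (show (1:Int) + nside ≤ 0 by omega)]

lemma stepB_nil_neg (nside : Int) (h : nside < 0) : stepB nside [] = [] := by
  simp [stepB, PySem.List.pyRange_one_eq_nil (show nside ≤ (0:Int) by omega)]

lemma stepB_one_neg (nside : Int) (h : nside < 0) : stepB nside [1] = [] := by
  simp [stepB, PySem.List.pyRange_one_eq_nil (show (1:Int) + nside ≤ 0 by omega)]

lemma fold_nil_const (f : List Int → List Int) (h : f [] = []) (l : List Int) :
    l.foldl (fun v _ => f v) ([] : List Int) = [] := by
  induction l with
  | nil => rfl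
  | cons x xs ih => simpa [h] using ih

-- ===== VERDICT (by name: the statement is the Claim_ definition above) =====
theorem gen_outcomes_spec : Claim_equal_gen_outcomes := by
  intro ndice nside _
  unfold Spec_gen_outcomes
  rw [genA_eq, genB_eq]
  by_cases h : 0 ≤ nside
  · obtain ⟨s, rfl⟩ : ∃ s : Nat, nside = (s : Int) := ⟨nside.toNat, (Int.toNat_of_nonneg h).symm⟩
    have : (fun (v : List Int) (_ : Int) => stepA (s : Int) v)
         = (fun (v : List Int) (_ : Int) => stepB (s : Int) v) := by
      funext v x; exact step_eq s v
    rw [this]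
  · by_cases hn : ndice ≤ 0
    · rw [PySem.List.pyRange_one_eq_nil hn]; rfl
    · rw [PySem.List.pyRange_one_cons (by omega : (0:Int) < ndice)]
      simp only [List.foldl_cons, stepA_one_neg nside (by omega), stepB_one_neg nside (by omega),
        fold_nil_const _ (stepA_nil_neg nside (by omega)), fold_nil_const _ (stepB_nil_neg nside (by omega))]
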